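-- pv_equiv track=rewrite | github.com/MForofontov/python-utils | iterable_functions/get_shared_elements.py | get_shared_elements
-- ===== SOURCE A (Python) =====
-- from typing import Any
-- from collections import Counter
--
-- def get_shared_elements(dict_: dict[str, list[Any]]) -> list[Any]:
--     """
--     Identify elements that appear in at least two lists within a dictionary.
--
--     Parameters
--     ----------
--     dict_ : dict
--         A dictionary where the values are lists of elements.
--
--     Returns
--     -------
--     list
--         A list containing elements that appear in at least two lists within the dictionary.
--
--     Raises
--     ------
--     TypeError
--         If dict_ is not a dictionary or if any value in dict_ is not a list.
--     ValueError
--         If any list contains unhashable elements.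
--     """
--     if not isinstance(dict_, dict):
--         raise TypeError("dict_ must be a dictionary")
--     if not all(isinstance(value, list) for value in dict_.values()):
--         raise TypeError("All values in dict_ must be lists")
--
--     all_elements = []
--     for sublist in dict_.values():
--         try:
--             all_elements.extend(sublist)
--         except TypeError as e:
--             raise TypeError(f"Sublist contains unhashable elements: {e}")
--
--     element_counts = Counter(all_elements)
--     shared_elements = [elem for elem, count in element_counts.items() if count >= 2]
--     return shared_elements
-- ===== SOURCE B (Python) =====
-- def get_shared_elements(dict_):
--     if not isinstance(dict_, dict):
--         raise TypeError("dict_ must be a dictionary")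
--     if not all(isinstance(value, list) for value in dict_.values()):
--         raise TypeError("All values in dict_ must be lists")
--
--     flat = [x for sublist in dict_.values() for x in sublist]
--
--     # Brute-force scan with no counting and no hash structures: pop elements
--     # one by one; emit x when it has not been seen before (not in the prefix)
--     # and it occurs again in the remaining suffix.
--     res, pre, rest = [], [], flat[:]
--     while rest:
--         x = rest.pop(0)
--         if x not in pre and x in rest:
--             res.append(x)
--         pre.append(x)
--     return res
-- ===== Notes on version B (the rewrite author's own statement) =====
-- stated objective: alternative
-- what changed: Replaces Counter-based counting entirely with an index-free quadratic prefix/suffix membership scan: each element is popped off the working list and emitted exactly when it is absent from the already-seen prefix but present again in the remaining suffix, which yields the duplicated elements in first-occurrence order without ever counting or hashing.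
import Mathlib
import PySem

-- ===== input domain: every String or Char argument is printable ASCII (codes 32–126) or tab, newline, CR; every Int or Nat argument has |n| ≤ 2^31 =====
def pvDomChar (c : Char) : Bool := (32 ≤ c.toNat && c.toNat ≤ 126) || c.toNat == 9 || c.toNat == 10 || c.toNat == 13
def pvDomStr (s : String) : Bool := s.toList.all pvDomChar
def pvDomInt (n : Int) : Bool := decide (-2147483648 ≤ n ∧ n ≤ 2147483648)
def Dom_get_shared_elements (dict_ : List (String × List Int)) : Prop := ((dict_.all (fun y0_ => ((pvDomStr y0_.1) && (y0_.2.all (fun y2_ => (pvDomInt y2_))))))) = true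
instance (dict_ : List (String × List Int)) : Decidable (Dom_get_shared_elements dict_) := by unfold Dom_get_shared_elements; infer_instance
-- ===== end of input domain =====

-- B replaces A's Counter-based counting entirely by an index-free quadratic
-- prefix/suffix membership scan (emit x when absent from the seen prefix and
-- present in the remaining suffix): a different algorithm, same return value.


-- ===== PORT A =====
-- the isinstance guards are always satisfied under the type convention, and
-- list.extend of a list never raises, so the try/except body is just the extend
def get_shared_elements (dict_ : List (String × List Int)) : List Int :=
  let all_elements : List Int := dict_.foldl (fun acc p => acc ++ p.2) []
  let element_counts : PySem.Dict Int Int := PySem.Dict.counter all_elements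
  (element_counts.items.filter (fun p => decide (2 ≤ p.2))).map (fun p => p.1)

-- ===== PORT B =====
-- the while loop of Source B: state (pre, res), recursion on rest (rest.pop(0) = the
-- structural head split); `x in pre` / `x in rest` are plain list membership
def gseLoop (pre res : List Int) : List Int → List Int
  | [] => res
  | x :: rest =>
    gseLoop (pre ++ [x]) (if !pre.contains x && rest.contains x then res ++ [x] else res) rest

def get_shared_elements_alt (dict_ : List (String × List Int)) : List Int :=
  let flat : List Int := dict_.foldl (fun acc p => acc ++ p.2) []
  gseLoop [] [] flat

-- ===== PRECONDITION & SPEC =====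
def Spec_get_shared_elements (dict_ : List (String × List Int)) (out : List Int) : Prop := out = get_shared_elements_alt dict_
instance (dict_ : List (String × List Int)) (out : List Int) : Decidable (Spec_get_shared_elements dict_ out) := by unfold Spec_get_shared_elements; infer_instance

-- ===== CLAIM (what is proved, stated in full; the proofs are below) =====
def Claim_equal_get_shared_elements : Prop := ∀ (dict_ : List (String × List Int)), Dom_get_shared_elements dict_ → Spec_get_shared_elements dict_ (get_shared_elements dict_)

-- ===== LEMMAS AND PROOFS =====

-- first occurrences in a list of elements not already in `pre` (proof-only)
def firstOccs (pre : List Int) : List Int → List Int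
  | [] => []
  | x :: r => if pre.contains x then firstOccs pre r else x :: firstOccs (pre ++ [x]) r

theorem gseLoop_append (rest : List Int) : ∀ (pre res : List Int),
    gseLoop pre res rest = res ++ gseLoop pre [] rest := by
  induction rest with
  | nil => intro pre res; simp [gseLoop]
  | cons x r ih =>
    intro pre res
    simp only [gseLoop]
    rw [ih (pre ++ [x]) (if !pre.contains x && r.contains x then res ++ [x] else res),
        ih (pre ++ [x]) (if !pre.contains x && r.contains x then [] ++ [x] else [])]
    by_cases h : (!pre.contains x && r.contains x) = true
    · rw [if_pos h, if_pos h]; simp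
    · rw [if_neg h, if_neg h]; simp

theorem mem_firstOccs (r : List Int) : ∀ (pre : List Int) (y : Int),
    y ∈ firstOccs pre r → ¬ y ∈ pre := by
  induction r with
  | nil => intro pre y h; simp [firstOccs] at h
  | cons x r ih =>
    intro pre y h
    by_cases hx : pre.contains x = true
    · rw [firstOccs, if_pos hx] at h; exact ih pre y h
    · rw [firstOccs, if_neg hx] at h
      rcases List.mem_cons.mp h with h1 | h2
      · subst h1; simpa using hx
      · intro hy
        exact ih (pre ++ [x]) y h2 (List.mem_append_left _ hy)

theorem firstOccs_congr (r : List Int) : ∀ (pre pre' : List Int),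
    (∀ y, y ∈ pre ↔ y ∈ pre') → firstOccs pre r = firstOccs pre' r := by
  induction r with
  | nil => intro _ _ _; rfl
  | cons x r ih =>
    intro pre pre' h
    have hc : pre.contains x = pre'.contains x := by
      by_cases hx : x ∈ pre
      · simp [hx, (h x).mp hx]
      · have hx' : x ∉ pre' := fun h' => hx ((h x).mpr h')
        simp [hx, hx']
    rw [firstOccs, firstOccs, hc]
    by_cases hx : pre'.contains x = true
    · rw [if_pos hx, if_pos hx]; exact ih pre pre' h
    · rw [if_neg hx, if_neg hx]
      refine congrArg (x :: ·) (ih _ _ (fun y => ?_))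
      simp [h y]

-- the heart of B's loop: it computes the duplicated elements among the
-- first occurrences, in order
theorem gseLoop_eq_filter (r : List Int) : ∀ (pre : List Int),
    gseLoop pre [] r = (firstOccs pre r).filter (fun y => decide (2 ≤ r.count y)) := by
  induction r with
  | nil => intro pre; rfl
  | cons x r ih =>
    intro pre
    have htail : ∀ (p : List Int), (∀ y ∈ firstOccs p r, y ≠ x) →
        (firstOccs p r).filter (fun y => decide (2 ≤ (x :: r).count y))
          = (firstOccs p r).filter (fun y => decide (2 ≤ r.count y)) := by
      intro p hp
      refine List.filter_congr (fun y hy => ?_)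
      have hne : ¬ x = y := fun h => hp y hy h.symm
      simp [hne]
    by_cases hx : pre.contains x = true
    · have hcond : (!pre.contains x && r.contains x) = false := by rw [hx]; rfl
      rw [gseLoop, hcond, if_neg (by simp), ih (pre ++ [x])]
      rw [firstOccs, if_pos hx]
      have hco : firstOccs (pre ++ [x]) r = firstOccs pre r := by
        refine firstOccs_congr r _ _ (fun y => ?_)
        have hx' : x ∈ pre := by simpa using hx
        constructor
        · intro h; rcases List.mem_append.mp h with h | h
          · exact h
          · simpa using (by simpa using h : y = x) ▸ hx'
        · intro h; exact List.mem_append_left _ h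
      have hne : ∀ y ∈ firstOccs pre r, y ≠ x := by
        intro y hy hyx; subst hyx
        exact mem_firstOccs r pre y hy (by simpa using hx)
      rw [hco, htail pre hne]
    · have hx' : pre.contains x = false := by simpa using hx
      rw [firstOccs, if_neg hx]
      have htl : (firstOccs (pre ++ [x]) r).filter (fun y => decide (2 ≤ (x :: r).count y))
          = (firstOccs (pre ++ [x]) r).filter (fun y => decide (2 ≤ r.count y)) := by
        refine htail (pre ++ [x]) (fun y hy hyx => ?_)
        exact mem_firstOccs r (pre ++ [x]) y hy (by simp [hyx])
      by_cases hr : r.contains x = true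
      · have hcond : (!pre.contains x && r.contains x) = true := by rw [hx', hr]; rfl
        rw [gseLoop, hcond, if_pos rfl, gseLoop_append, ih (pre ++ [x])]
        have h1 : 1 ≤ r.count x := List.one_le_count_iff.mpr (by simpa using hr)
        have hcnt : decide (2 ≤ (x :: r).count x) = true := by
          have : (2 : Nat) ≤ (x :: r).count x := by rw [List.count_cons_self]; omega
          simpa using this
        rw [List.filter_cons, hcnt]
        simp [htl]
      · have hr' : r.contains x = false := by simpa using hr
        have hcond : (!pre.contains x && r.contains x) = false := by rw [hr']; simp
        rw [gseLoop, hcond, if_neg (by simp), ih (pre ++ [x])]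
        have hcnt : decide (2 ≤ (x :: r).count x) = false := by
          have h0 : r.count x = 0 := List.count_eq_zero.mpr (by simpa using hr)
          have : (x :: r).count x = 1 := by rw [List.count_cons_self, h0]
          simp [this]
        rw [List.filter_cons, hcnt]
        simp [htl]

-- Set.update pre r extends pre on the right
theorem update_prefix (l : List Int) : ∀ (s : PySem.Set Int),
    ∃ t, PySem.Set.update s l = s ++ t := by
  induction l with
  | nil => exact fun s => ⟨[], by simp [PySem.Set.update]⟩
  | cons a tl ih =>
    intro s
    simp only [PySem.Set.update, List.foldl_cons]
    by_cases h : PySem.Set.contains s a = true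
    · rw [show PySem.Set.add s a = s from by unfold PySem.Set.add; rw [if_pos h]]
      exact ih s
    · rw [show PySem.Set.add s a = s ++ [a] from by unfold PySem.Set.add; rw [if_neg h]]
      obtain ⟨t, ht⟩ := ih (s ++ [a])
      exact ⟨a :: t, by rw [show List.foldl PySem.Set.add (s ++ [a]) tl = s ++ [a] ++ t from ht]; simp⟩

-- firstOccs is the new part of Set.update
theorem firstOccs_eq_update_drop (r : List Int) : ∀ (pre : List Int),
    firstOccs pre r = (PySem.Set.update pre r).drop pre.length := by
  induction r with
  | nil => intro pre; simp [firstOccs, PySem.Set.update]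
  | cons x tl ih =>
    intro pre
    have hc : PySem.Set.contains pre x = pre.contains x := by
      simp [PySem.Set.contains]
    by_cases hx : pre.contains x = true
    · rw [firstOccs, if_pos hx, ih pre]
      simp only [PySem.Set.update, List.foldl_cons,
        show PySem.Set.add pre x = pre from by unfold PySem.Set.add; rw [hc, if_pos hx]]
    · rw [firstOccs, if_neg hx, ih (pre ++ [x])]
      have hupd : PySem.Set.update pre (x :: tl) = PySem.Set.update (pre ++ [x]) tl := by
        simp only [PySem.Set.update, List.foldl_cons,
          show PySem.Set.add pre x = pre ++ [x] from by unfold PySem.Set.add; rw [hc, if_neg hx]]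
      obtain ⟨t, ht⟩ := update_prefix tl (pre ++ [x])
      have h1 : List.drop (pre ++ [x]).length (pre ++ [x] ++ t) = t := List.drop_left
      have h2 : List.drop pre.length (pre ++ ([x] ++ t)) = [x] ++ t := List.drop_left
      rw [hupd, ht, h1, List.append_assoc, h2]
      rfl

-- A's side: Counter items filtered by count ≥ 2 = first occurrences with count ≥ 2
theorem gse_A_eq (flat : List Int) :
    ((PySem.Dict.counter flat).items.filter (fun p => decide (2 ≤ p.2))).map (fun p => p.1)
      = (PySem.Set.ofList flat).filter (fun y => decide (2 ≤ flat.count y)) := by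
  rw [PySem.Dict.items_counter, List.filter_map, List.map_map]
  have hpred : ∀ x ∈ PySem.Set.ofList flat,
      ((fun p : Int × Int => decide (2 ≤ p.2)) ∘ fun k => (k, ((flat.count k : Nat) : Int))) x
        = decide (2 ≤ flat.count x) := by
    intro x _
    simp only [Function.comp]
    refine decide_eq_decide.mpr ?_
    constructor <;> intro h <;> exact_mod_cast h
  rw [List.filter_congr hpred]
  have hid : ((fun p : Int × Int => p.1) ∘ fun k : Int => (k, ((flat.count k : Nat) : Int))) = id := rfl
  rw [hid, List.map_id]

-- ===== VERDICT (by name: the statement is the Claim_ definition above) =====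
theorem get_shared_elements_spec : Claim_equal_get_shared_elements := by
  intro dict_ _
  show get_shared_elements dict_ = get_shared_elements_alt dict_
  set flat := dict_.foldl (fun acc p => acc ++ p.2) [] with hflat
  show ((PySem.Dict.counter flat).items.filter (fun p => decide (2 ≤ p.2))).map (fun p => p.1)
    = gseLoop [] [] flat
  rw [gse_A_eq, gseLoop_eq_filter flat []]
  rw [firstOccs_eq_update_drop flat []]
  rfl
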